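-- pv_equiv track=rewrite | github.com/tenache/whatsappBot2 | scripts_tenache/auxiliary_funcs.py | check_correct_dict
-- ===== SOURCE A (Python) =====
-- def check_correct_dict(answer_dict, correct_keys):
--     new_dict = answer_dict.copy()
--     for key in answer_dict:
--         if type(answer_dict[key]) == str:
--             comma_index = -1
--             comma_index  = answer_dict[key].find(",")
--             while comma_index != -1:
--                 new_dict[key] = new_dict[key][comma_index+1:]
--                 comma_index = new_dict[key].find(",")
--             new_dict[key] = new_dict[key].strip()
--         if key not in correct_keys:
--             del new_dict[key]
--
--     for c_key in correct_keys:
--         if c_key not in new_dict: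
--             new_dict[c_key] = None
--     return new_dict
-- ===== SOURCE B (Python) =====
-- def check_correct_dict(answer_dict, correct_keys):
--     # one lookup-driven pass: keep only correct keys, take the text after the
--     # last comma, then fill in missing correct keys with None
--     result = {k: (v[v.rfind(',') + 1:].strip() if isinstance(v, str) else v)
--               for k, v in answer_dict.items() if k in correct_keys}
--     for k in correct_keys:
--         result.setdefault(k, None)
--     return result
-- ===== Notes on version B (the rewrite author's own statement) =====
-- stated objective: simpler
-- what changed: A copies the dict, runs a repeated find/slice while-loop per value, deletes unwanted keys in place and then fills missing keys; B builds the result in one comprehension (rfind gives the text after the last comma directly) plus a setdefault loop.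
import Mathlib
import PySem

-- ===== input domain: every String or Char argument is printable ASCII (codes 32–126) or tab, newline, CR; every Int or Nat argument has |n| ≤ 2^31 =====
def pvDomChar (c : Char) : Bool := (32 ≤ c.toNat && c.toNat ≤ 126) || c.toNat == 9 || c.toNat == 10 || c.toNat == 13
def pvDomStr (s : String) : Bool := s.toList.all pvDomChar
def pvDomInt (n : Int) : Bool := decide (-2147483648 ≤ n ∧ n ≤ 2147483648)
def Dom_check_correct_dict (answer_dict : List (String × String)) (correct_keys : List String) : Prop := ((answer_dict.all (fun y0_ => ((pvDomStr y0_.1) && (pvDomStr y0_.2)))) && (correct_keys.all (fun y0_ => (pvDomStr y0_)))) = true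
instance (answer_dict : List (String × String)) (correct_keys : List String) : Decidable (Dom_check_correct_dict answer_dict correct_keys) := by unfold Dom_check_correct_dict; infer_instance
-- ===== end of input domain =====

-- B replaces A's copy/transform/delete/fill dict passes by one lookup-driven comprehension
-- (rfind gives the text after the last comma directly) plus a setdefault loop: simpler.
-- Pre_ restricts to association lists without duplicate keys (A's argument is a Python dict).


-- ===== PORT A =====
-- A's while loop: 'while comma_index != -1: new_dict[key] = new_dict[key][comma_index+1:];
-- comma_index = new_dict[key].find(",")', performed on the value itself (A stores the value
-- back into new_dict[key] on every iteration; under unique keys the stored-back value is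
-- exactly the one this recursion carries).
def pvAfterCommasA (s : String) : String :=
  let i := PySem.Str.find s ","
  if i = -1 then s
  else pvAfterCommasA (PySem.Str.slice s (some (i + 1)) none)
termination_by s.toList.length
decreasing_by
  rename_i h
  have hfind : i = PySem.Chars.find s.toList ",".toList := PySem.Str.find_eq s ","
  have h0 : (0:Int) ≤ i := by
    have := PySem.Chars.neg_one_le_find s.toList ",".toList
    rw [hfind] at h ⊢; omega
  have hinf : (",".toList) <:+: s.toList := by
    by_contra hc
    exact h (hfind ▸ (PySem.Chars.find_eq_neg_one_iff s.toList ",".toList).mpr hc)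
  have hlen : 1 ≤ s.toList.length := by
    have := List.IsInfix.length_le hinf
    simpa using this
  have hsl : (PySem.Str.slice s (some (i + 1)) none).toList = s.toList.drop (i+1).toNat := by
    rw [PySem.Str.toList_slice, PySem.Chars.slice_eq_listSlice,
      PySem.List.slice_from (xs := s.toList) (a := i + 1) (by omega)]
  rw [hsl]
  simp only [List.length_drop]
  omega


def check_correct_dict (answer_dict : List (String × String)) (correct_keys : List String) : List (String × Option String) :=
  -- new_dict = answer_dict.copy()   (value type Option String: some keys get None later)
  let new0 : PySem.Dict String (Option String) :=
    PySem.Dict.ofList (answer_dict.map (fun kv => (kv.1, some kv.2)))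
  -- for key in answer_dict:
  let nd := answer_dict.foldl (fun nd kv =>
    let key := kv.1
    -- type(answer_dict[key]) == str : always true here (every value is a string);
    -- new_dict[key] : key is still present with a some-value at this point (unique keys)
    let v := match nd.get? key with | some (some v) => v | _ => ""
    -- the while loop, then new_dict[key] = new_dict[key].strip()
    let nd := nd.insert key (some (PySem.Str.strip (pvAfterCommasA v)))
    -- if key not in correct_keys: del new_dict[key]
    if correct_keys.contains key then nd else nd.erase key) new0
  -- for c_key in correct_keys: if c_key not in new_dict: new_dict[c_key] = None
  (correct_keys.foldl (fun nd c_key =>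
    if nd.contains c_key then nd else nd.insert c_key none) nd).items

-- ===== PORT B =====
def check_correct_dict_alt (answer_dict : List (String × String)) (correct_keys : List String) : List (String × Option String) :=
  -- result = {k: v[v.rfind(',') + 1:].strip() for k, v in answer_dict.items() if k in correct_keys}
  -- (isinstance(v, str) is always true here: every value is a string)
  let result : PySem.Dict String (Option String) :=
    PySem.Dict.ofList (answer_dict.filterMap (fun kv =>
      if correct_keys.contains kv.1 then
        some (kv.1, some (PySem.Str.strip
          (PySem.Str.slice kv.2 (some (PySem.Str.rfind kv.2 "," + 1)) none)))
      else none))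
  -- for k in correct_keys: result.setdefault(k, None)
  (correct_keys.foldl (fun d k => d.setdefault k none) result).items

-- ===== PRECONDITION & SPEC =====
-- Pre_ excludes association lists with duplicate keys: A's parameter is a Python dict, which
-- cannot hold duplicate keys, so such lists represent no actual input of A.
def Pre_check_correct_dict (answer_dict : List (String × String)) (correct_keys : List String) : Prop :=
  (answer_dict.map Prod.fst).Nodup
instance (answer_dict : List (String × String)) (correct_keys : List String) : Decidable (Pre_check_correct_dict answer_dict correct_keys) := by unfold Pre_check_correct_dict; infer_instance

def pvWitness_check_correct_dict : (List (String × String)) × List String :=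
  ([("a", "x, 1"), ("c", "zz")], ["a", "b"])

def Spec_check_correct_dict (answer_dict : List (String × String)) (correct_keys : List String) (out : List (String × Option String)) : Prop := out = check_correct_dict_alt answer_dict correct_keys
instance (answer_dict : List (String × String)) (correct_keys : List String) (out : List (String × Option String)) : Decidable (Spec_check_correct_dict answer_dict correct_keys out) := by unfold Spec_check_correct_dict; infer_instance

-- ===== CLAIM (what is proved, stated in full; the proofs are below) =====
def Claim_equal_check_correct_dict : Prop := ∀ (answer_dict : List (String × String)) (correct_keys : List String), Dom_check_correct_dict answer_dict correct_keys → Pre_check_correct_dict answer_dict correct_keys → Spec_check_correct_dict answer_dict correct_keys (check_correct_dict answer_dict correct_keys)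

-- ===== LEMMAS AND PROOFS =====

lemma pvAC_stop (s : String) (h : PySem.Str.find s "," = -1) : pvAfterCommasA s = s := by
  rw [pvAfterCommasA]
  split
  · rfl
  · rename_i hc; exact absurd h hc

lemma pvAC_step (s : String) (h : ¬ PySem.Str.find s "," = -1) :
    pvAfterCommasA s = pvAfterCommasA (PySem.Str.slice s (some (PySem.Str.find s "," + 1)) none) := by
  conv_lhs => rw [pvAfterCommasA]
  split
  · rename_i hc; exact absurd hc h
  · rfl

lemma pvSlice_toList (s : String) (i : Int) (h0 : (0:Int) ≤ i) :
    (PySem.Str.slice s (some (i + 1)) none).toList = s.toList.drop (i+1).toNat := by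
  rw [PySem.Str.toList_slice, PySem.Chars.slice_eq_listSlice,
    PySem.List.slice_from (xs := s.toList) (a := i + 1) (by omega)]

lemma pvPrefix_comma_iff' (l : List Char) : [','].isPrefixOf l = true ↔ l.head? = some ',' := by
  cases l with
  | nil => simp [List.isPrefixOf]
  | cons a t => simp [List.isPrefixOf]; exact eq_comm

lemma pvAfterCommasA_spec (s : String) : ∃ k : Nat, k ≤ s.toList.length ∧
    (pvAfterCommasA s).toList = s.toList.drop k ∧ ',' ∉ s.toList.drop k ∧
    (k = 0 ∨ s.toList[k-1]? = some ',') := by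
  induction s using pvAfterCommasA.induct with
  | case1 s i hi =>
    refine ⟨0, by omega, ?_, ?_, Or.inl rfl⟩
    · rw [pvAC_stop s hi]; simp
    · have hfind := PySem.Str.find_eq s ","
      have hninf := (PySem.Chars.find_eq_neg_one_iff s.toList ",".toList).mp (hfind ▸ hi)
      simp only [List.drop_zero]
      intro hc
      exact hninf (by simpa using (List.singleton_infix_iff ',' s.toList).mpr hc)
  | case2 s i0 hi ih =>
    have hidef : i0 = PySem.Str.find s "," := rfl
    clear_value i0
    have hfind : i0 = PySem.Chars.find s.toList ",".toList := hidef.trans (PySem.Str.find_eq s ",")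
    have h0 : (0:Int) ≤ i0 := by
      have := PySem.Chars.neg_one_le_find s.toList ",".toList
      rw [hfind] at hi ⊢
      omega
    have hto : (i0+1).toNat = i0.toNat + 1 := by omega
    have hspec := PySem.Chars.find_spec (s := s.toList) (sub := ",".toList) (by rw [← hfind]; exact h0)
    have hcomma : s.toList[i0.toNat]? = some ',' := by
      have hpre : (",".toList).isPrefixOf (s.toList.drop i0.toNat) = true := by
        rw [List.isPrefixOf_iff_prefix]
        rw [hfind]
        simpa using hspec.1
      have := (pvPrefix_comma_iff' _).mp (by simpa using hpre)
      simpa [List.head?_drop] using this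
    have hlt : i0.toNat < s.toList.length := by
      obtain ⟨h, -⟩ := List.getElem?_eq_some_iff.mp hcomma
      exact h
    obtain ⟨k', hk'le, heq, hno, hlast⟩ := ih
    rw [pvSlice_toList s i0 h0] at hk'le heq hno hlast
    simp only [List.length_drop] at hk'le
    simp only [hto] at hk'le heq hno hlast
    have hlen2 : i0.toNat + 1 + k' ≤ s.toList.length := by omega
    refine ⟨i0.toNat + 1 + k', hlen2, ?_, ?_, ?_⟩
    · rw [pvAC_step s (by rw [← hidef]; exact hi), ← hidef, heq, List.drop_drop]
    · rwa [List.drop_drop] at hno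
    · right
      rcases hlast with h0' | hC
      · subst h0'
        have harith : i0.toNat + 1 + 0 - 1 = i0.toNat := by omega
        rw [harith]
        exact hcomma
      · rw [List.getElem?_drop] at hC
        rcases Nat.eq_zero_or_pos k' with rfl | hpos
        · exfalso
          simp only [List.drop_zero] at hno
          apply hno
          refine List.mem_iff_getElem?.mpr ⟨0, ?_⟩
          rw [List.getElem?_drop]
          simpa using hC
        · have harith : i0.toNat + 1 + k' - 1 = (i0.toNat + 1) + (k'-1) := by omega
          rw [harith]
          exact hC

lemma pvRfind_go_spec (cs : List Char) (n : Nat) :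
    (PySem.Chars.rfind.go cs [','] n = -1 ∧ ∀ j ≤ n, cs[j]? ≠ some ',')
  ∨ (∃ j : Nat, j ≤ n ∧ PySem.Chars.rfind.go cs [','] n = j ∧ cs[j]? = some ','
       ∧ ∀ i, j < i → i ≤ n → cs[i]? ≠ some ',') := by
  induction n with
  | zero =>
    by_cases h : [','].isPrefixOf cs = true
    · right
      refine ⟨0, le_refl 0, by simp [PySem.Chars.rfind.go, h], ?_, ?_⟩
      · have := (pvPrefix_comma_iff' cs).mp h
        simpa [List.head?_eq_getElem?] using this
      · intro i hi hi2; omega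
    · left
      refine ⟨by simp [PySem.Chars.rfind.go, h], ?_⟩
      intro j hj
      interval_cases j
      intro hc
      exact h ((pvPrefix_comma_iff' cs).mpr (by simpa [List.head?_eq_getElem?] using hc))
  | succ n ih =>
    by_cases h : [','].isPrefixOf (cs.drop (n+1)) = true
    · right
      refine ⟨n+1, le_refl _, by simp [PySem.Chars.rfind.go, h], ?_, ?_⟩
      · have := (pvPrefix_comma_iff' _).mp h
        simpa [List.head?_drop] using this
      · intro i h1 h2; omega
    · have hne : cs[n+1]? ≠ some ',' := by
        intro hc
        exact h ((pvPrefix_comma_iff' _).mpr (by simpa [List.head?_drop] using hc))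
      rcases ih with ⟨hgo, hall⟩ | ⟨j, hj, hgo, hcomma, hafter⟩
      · left
        refine ⟨by simp [PySem.Chars.rfind.go, h, hgo], ?_⟩
        intro j hj
        rcases Nat.lt_or_ge j (n+1) with hl | hg
        · exact hall j (by omega)
        · have : j = n+1 := by omega
          simpa [this] using hne
      · right
        refine ⟨j, by omega, by simp [PySem.Chars.rfind.go, h, hgo], hcomma, ?_⟩
        intro i h1 h2
        rcases Nat.lt_or_ge i (n+1) with hl | hg
        · exact hafter i h1 (by omega)
        · have : i = n+1 := by omega
          simpa [this] using hne

lemma pvRfind_eq (cs : List Char) (k : Nat) (hk : k ≤ cs.length)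
    (hno : ',' ∉ cs.drop k) (hc : k = 0 ∨ cs[k-1]? = some ',') :
    PySem.Chars.rfind cs [','] + 1 = (k : Int) := by
  have hmem : ∀ j : Nat, k ≤ j → cs[j]? ≠ some ',' := by
    intro j hj hcon
    apply hno
    refine List.mem_iff_getElem?.mpr ⟨j - k, ?_⟩
    rw [List.getElem?_drop]
    rw [Nat.add_sub_cancel' hj]
    exact hcon
  have hgo := pvRfind_go_spec cs cs.length
  have hrfind : PySem.Chars.rfind cs [','] = PySem.Chars.rfind.go cs [','] cs.length := rfl
  rcases Nat.eq_zero_or_pos k with rfl | hpos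
  · rcases hgo with ⟨hval, -⟩ | ⟨j, hj, hval, hcomma, -⟩
    · rw [hrfind, hval]; norm_num
    · exact absurd hcomma (hmem j (by omega))
  · have hc' : cs[k-1]? = some ',' := by
      rcases hc with h0 | h
      · omega
      · exact h
    have hklt : k - 1 < cs.length := (List.getElem?_eq_some_iff.mp hc').1
    rcases hgo with ⟨hval, hall⟩ | ⟨j, hj, hval, hcomma, hafter⟩
    · exact absurd hc' (hall (k-1) (by omega))
    · have hjk : j = k - 1 := by
        rcases Nat.lt_trichotomy j (k-1) with hl | he | hg
        · exact absurd hc' (hafter (k-1) hl (by omega))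
        · exact he
        · exact absurd hcomma (hmem j (by omega))
      rw [hrfind, hval, hjk]
      omega

lemma pvValue_eq (s : String) :
    PySem.Str.strip (pvAfterCommasA s) =
    PySem.Str.strip (PySem.Str.slice s (some (PySem.Str.rfind s "," + 1)) none) := by
  obtain ⟨k, hk, heq, hno, hc⟩ := pvAfterCommasA_spec s
  congr 1
  rw [← String.toList_inj, heq]
  have hr : PySem.Str.rfind s "," + 1 = (k : Int) := by
    rw [PySem.Str.rfind_eq]
    exact pvRfind_eq s.toList k hk hno hc
  rw [hr, PySem.Str.toList_slice, PySem.Chars.slice_eq_listSlice,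
    PySem.List.slice_from (xs := s.toList) (a := (k:Int)) (by positivity)]
  simp

def pvB (ck : List String) (l : List (String × String)) : List (String × Option String) :=
  l.filterMap (fun kv =>
    if ck.contains kv.1 then
      some (kv.1, some (PySem.Str.strip
        (PySem.Str.slice kv.2 (some (PySem.Str.rfind kv.2 "," + 1)) none)))
    else none)

lemma pvB_append (ck : List String) (l₁ l₂ : List (String × String)) :
    pvB ck (l₁ ++ l₂) = pvB ck l₁ ++ pvB ck l₂ := by
  simp [pvB]

lemma pvB_keys_sublist (ck : List String) (l : List (String × String)) :
    ((pvB ck l).map Prod.fst).Sublist (l.map Prod.fst) := by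
  induction l with
  | nil => simp [pvB]
  | cons kv t ih =>
    simp only [pvB, List.filterMap_cons]
    split
    · exact (show ((pvB ck t).map Prod.fst).Sublist _ from ih).trans (List.sublist_cons_self _ _)
    · rename_i v hv
      split at hv
      · rw [Option.some.injEq] at hv
        subst hv
        exact List.Sublist.cons₂ kv.1 ih
      · exact absurd hv (by simp)

lemma pvB_fst_mem (ck : List String) (l : List (String × String)) {p : String × Option String}
    (hp : p ∈ pvB ck l) : p.1 ∈ l.map Prod.fst :=
  (pvB_keys_sublist ck l).mem (List.mem_map_of_mem hp)

lemma pvOfList_items {ν : Type} (l : List (String × ν)) (h : (l.map Prod.fst).Nodup) :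
    (PySem.Dict.ofList l).items = l := by
  have := PySem.Dict.items_foldl_insert_fresh (κ := String) (ν := ν) l (fun a => a.1) (fun a => a.2)
    PySem.Dict.empty (by intro a _; simp) (by simpa using h)
  simpa [PySem.Dict.ofList, PySem.Dict.update] using this

lemma pvStep (ck : List String) (done r' : List (String × String)) (kv : String × String)
    (hkd : kv.1 ∉ done.map Prod.fst) (hkr : kv.1 ∉ r'.map Prod.fst) :
    (fun (nd : PySem.Dict String (Option String)) (kv : String × String) =>
      let key := kv.1
      let v := match nd.get? key with | some (some v) => v | _ => ""
      let nd := nd.insert key (some (PySem.Str.strip (pvAfterCommasA v)))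
      if ck.contains key then nd else nd.erase key)
    (PySem.Dict.mk (pvB ck done ++ (kv.1, some kv.2) :: r'.map (fun kv => (kv.1, some kv.2)))) kv
    = PySem.Dict.mk (pvB ck (done ++ [kv]) ++ r'.map (fun kv => (kv.1, some kv.2))) := by
  have hX : ∀ p ∈ pvB ck done, (p.1 == kv.1) = false := by
    intro p hp
    rw [beq_eq_false_iff_ne]
    intro he
    exact hkd (he ▸ pvB_fst_mem ck done hp)
  have hY : ∀ p ∈ r'.map (fun kv => (kv.1, (some kv.2 : Option String))), (p.1 == kv.1) = false := by
    intro p hp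
    rw [beq_eq_false_iff_ne]
    obtain ⟨q, hq, rfl⟩ := List.mem_map.mp hp
    intro he
    exact hkr (he ▸ List.mem_map_of_mem hq)
  have hfind : List.find? (fun p => p.1 == kv.1)
      (pvB ck done ++ (kv.1, some kv.2) :: r'.map (fun kv => (kv.1, some kv.2))) = some (kv.1, some kv.2) := by
    rw [List.find?_append, List.find?_eq_none.mpr (by intro p hp; simp [hX p hp]), Option.none_or,
      List.find?_cons_of_pos (by simp)]
  have hget : (PySem.Dict.mk (pvB ck done ++ (kv.1, some kv.2) :: r'.map (fun kv => (kv.1, some kv.2)))).get? kv.1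
      = some (some kv.2) := by
    simp only [PySem.Dict.get?, hfind, Option.map_some]
  have hcontains : (PySem.Dict.mk (pvB ck done ++ (kv.1, some kv.2) :: r'.map (fun kv => (kv.1, some kv.2)))).contains kv.1 = true := by
    simp [PySem.Dict.contains]
  have hins : (PySem.Dict.mk (pvB ck done ++ (kv.1, some kv.2) :: r'.map (fun kv => (kv.1, some kv.2)))).insert kv.1
        (some (PySem.Str.strip (pvAfterCommasA kv.2)))
      = PySem.Dict.mk (pvB ck done ++ (kv.1, some (PySem.Str.strip (pvAfterCommasA kv.2))) :: r'.map (fun kv => (kv.1, some kv.2))) := by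
    simp only [PySem.Dict.insert, hcontains, if_pos]
    congr 1
    rw [List.map_append, List.map_cons]
    congr 1
    · exact (List.map_congr_left (fun p hp => by simp [hX p hp])).trans (List.map_id _)
    · congr 1
      · simp
      · exact (List.map_congr_left (fun p hp => by simp [hY p hp])).trans (List.map_id _)
  simp only [hget]
  by_cases hck : ck.contains kv.1 = true
  · rw [if_pos hck, hins, pvB_append]
    have hck' : kv.1 ∈ ck := by simpa using hck
    have hsingle : pvB ck [kv] = [(kv.1, some (PySem.Str.strip (pvAfterCommasA kv.2)))] := by
      simp [pvB, hck', pvValue_eq kv.2]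
    rw [hsingle]
    simp
  · rw [if_neg hck, hins]
    have hck' : kv.1 ∉ ck := by simpa using hck
    have hsingle : pvB ck [kv] = [] := by simp [pvB, hck']
    simp only [PySem.Dict.erase]
    congr 1
    rw [List.filter_append, List.filter_cons_of_neg (by simp),
      List.filter_eq_self.mpr (by intro p hp; simp [hX p hp]),
      List.filter_eq_self.mpr (by intro p hp; simp [hY p hp]),
      pvB_append, hsingle]
    simp

lemma pvPhase1 (ck : List String) :
    ∀ (r done : List (String × String)), (((done ++ r).map Prod.fst)).Nodup →
    r.foldl (fun (nd : PySem.Dict String (Option String)) (kv : String × String) =>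
      let key := kv.1
      let v := match nd.get? key with | some (some v) => v | _ => ""
      let nd := nd.insert key (some (PySem.Str.strip (pvAfterCommasA v)))
      if ck.contains key then nd else nd.erase key)
      (PySem.Dict.mk (pvB ck done ++ r.map (fun kv => (kv.1, some kv.2))))
    = PySem.Dict.mk (pvB ck (done ++ r)) := by
  intro r
  induction r with
  | nil =>
    intro done h
    rw [List.foldl_nil, List.map_nil, List.append_nil, List.append_nil]
  | cons kv r' ih =>
    intro done h
    have hkd : kv.1 ∉ done.map Prod.fst := by
      simp only [List.map_append, List.nodup_append] at h
      intro hc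
      exact h.2.2 kv.1 hc kv.1 (by simp) rfl
    have hkr : kv.1 ∉ r'.map Prod.fst := by
      simp only [List.map_append, List.map_cons] at h
      have := h.of_append_right
      simp only [List.nodup_cons] at this
      exact this.1
    rw [List.foldl_cons, List.map_cons]
    have hmid : List.foldl _ _ r' = _ := ih (done ++ [kv]) (by simpa using h)
    calc _ = List.foldl (fun (nd : PySem.Dict String (Option String)) (kv : String × String) =>
              let key := kv.1
              let v := match nd.get? key with | some (some v) => v | _ => ""
              let nd := nd.insert key (some (PySem.Str.strip (pvAfterCommasA v)))
              if ck.contains key then nd else nd.erase key)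
            (PySem.Dict.mk (pvB ck (done ++ [kv]) ++ r'.map (fun kv => (kv.1, some kv.2)))) r' := by
              congr 1
              exact pvStep ck done r' kv hkd hkr
      _ = PySem.Dict.mk (pvB ck (done ++ kv :: r')) := by
              rw [ih (done ++ [kv]) (by simpa using h)]
              simp

lemma pvPhase2 (ck : List String) (d : PySem.Dict String (Option String)) :
    ck.foldl (fun nd c_key => if nd.contains c_key then nd else nd.insert c_key none) d
    = ck.foldl (fun d k => d.setdefault k none) d := by
  induction ck generalizing d with
  | nil => rfl
  | cons c t ih =>
    rw [List.foldl_cons, List.foldl_cons, ih]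
    congr 1
    by_cases h : d.contains c = true
    · rw [if_pos h, PySem.Dict.setdefault_of_contains _ _ h]
    · rw [if_neg h, PySem.Dict.setdefault_of_not_contains _ _ (by simpa using h)]

theorem main_eq (ad : List (String × String)) (ck : List String)
    (hpre : (ad.map Prod.fst).Nodup) : check_correct_dict ad ck = check_correct_dict_alt ad ck := by
  unfold check_correct_dict check_correct_dict_alt
  show (ck.foldl (fun nd c_key => if nd.contains c_key then nd else nd.insert c_key none)
        (ad.foldl (fun (nd : PySem.Dict String (Option String)) (kv : String × String) =>
          let key := kv.1
          let v := match nd.get? key with | some (some v) => v | _ => ""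
          let nd := nd.insert key (some (PySem.Str.strip (pvAfterCommasA v)))
          if ck.contains key then nd else nd.erase key)
          (PySem.Dict.ofList (ad.map (fun kv => (kv.1, some kv.2)))))).items
     = (ck.foldl (fun d k => d.setdefault k none) (PySem.Dict.ofList (pvB ck ad))).items
  have h0 : PySem.Dict.ofList (ad.map (fun kv => (kv.1, (some kv.2 : Option String))))
      = PySem.Dict.mk (pvB ck [] ++ ad.map (fun kv => (kv.1, some kv.2))) := by
    apply PySem.Dict.ext
    rw [pvOfList_items]
    · simp [pvB]
    · simpa [List.map_map, Function.comp] using hpre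
  have hB : PySem.Dict.ofList (pvB ck ad) = PySem.Dict.mk (pvB ck ad) := by
    apply PySem.Dict.ext
    rw [pvOfList_items]
    exact ((pvB_keys_sublist ck ad).nodup hpre)
  rw [h0, hB, pvPhase1 ck ad [] (by simpa using hpre), pvPhase2]
  simp


-- ===== VERDICT (by name: the statement is the Claim_ definition above) =====
theorem check_correct_dict_spec : Claim_equal_check_correct_dict := by
  intro ad ck _hdom hpre
  unfold Spec_check_correct_dict
  exact main_eq ad ck hpre
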